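-- pv_equiv track=rewrite | github.com/SimengBian/Topologies | bcube.py | getCommonSwitch
-- ===== SOURCE A (Python) =====
-- def getSvrAddr(x,n,k):
-- 	num = x
-- 	mid = [0 for i in range(k+1)]
-- 	i = k
-- 	while i>=0:
-- 		if num==0:
-- 			mid[i] = 0
-- 			break
-- 		num,rem = divmod(num,n)
-- 		mid[i] = rem
-- 		i = i - 1
-- 	return mid + []
--
-- def switchAddr2ID(addr,n,k):
-- 	a = addr + []
-- 	ID = n**(k+1)
-- 	ID = ID + a[0] * n**k
-- 	i = 1
-- 	while(i<=k):
-- 		ID = ID + a[i]*n**(k-i)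
-- 		i = i + 1
-- 	return ID
--
-- def getCommonSwitch(x,y,n,k):
-- 	x_addr = getSvrAddr(x,n,k)
-- 	y_addr = getSvrAddr(y,n,k)
-- 	for i in range(k+1):
-- 		if(x_addr[i]!=y_addr[i]):
-- 			l = k-i # common switch layer
-- 	temp = x_addr + []
-- 	del temp[k-l]
-- 	commonsw_addr = []
-- 	commonsw_addr.append(l)
-- 	commonsw_addr = commonsw_addr + temp
-- 	commonsw = switchAddr2ID(commonsw_addr,n,k)
-- 	return commonsw
-- ===== SOURCE B (Python) =====
-- def getCommonSwitch(x, y, n, k):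
--     # One arithmetic pass over the iterated base-n quotients: find the lowest
--     # digit position l where x and y differ, then delete that digit of x
--     # arithmetically (no address lists, no helper functions).
--     qx, qy, low, l = x, y, 0, -1
--     for t in range(k + 1):
--         if l < 0 and qx % n != qy % n:
--             l = t
--             lowl = low          # value of x's digits below position l
--             qhi = qx // n       # x with digits 0..l stripped off
--         low += (qx % n) * n**t
--         qx //= n
--         qy //= n
--     high = qhi - n**(k - l) * qx    # digits l+1..k of x, as a number
--     return n**(k + 1) + l * n**k + high * n**l + lowl
-- ===== Notes on version B (the rewrite author's own statement) =====
-- stated objective: simpler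
-- what changed: B replaces A's two helper functions and address-list machinery (build two digit lists, scan them for the last differing index, delete an element, re-evaluate a polynomial) by a single arithmetic pass over iterated base-n quotients that finds the lowest differing digit and deletes that digit of x with a closed-form expression.
import Mathlib
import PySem

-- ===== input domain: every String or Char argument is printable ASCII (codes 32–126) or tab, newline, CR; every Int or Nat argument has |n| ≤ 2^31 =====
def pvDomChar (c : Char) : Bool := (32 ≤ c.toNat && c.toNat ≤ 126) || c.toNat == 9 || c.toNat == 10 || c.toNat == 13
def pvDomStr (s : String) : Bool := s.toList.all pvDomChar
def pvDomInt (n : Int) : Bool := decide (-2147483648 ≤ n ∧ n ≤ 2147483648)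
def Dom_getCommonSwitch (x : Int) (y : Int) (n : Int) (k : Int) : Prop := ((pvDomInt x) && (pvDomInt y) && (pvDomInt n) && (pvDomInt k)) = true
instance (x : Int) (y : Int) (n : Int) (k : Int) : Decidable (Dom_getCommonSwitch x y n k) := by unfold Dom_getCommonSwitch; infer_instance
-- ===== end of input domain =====

-- B replaces A's address-list build / element deletion / polynomial re-evaluation by a
-- single arithmetic pass over iterated base-n quotients (objective: simpler, no lists, no helpers).

-- ===== PORT A =====
-- while-loop of getSvrAddr; fuel m = i+1 where i is the current index (i runs k, k-1, …, 0).
-- divmod(num, n): Python raises ZeroDivisionError for n = 0 (num ≠ 0); Pre_ excludes n = 0,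
-- so total floordiv/mod are exact here.
def getSvrAddrLoop (n : Int) : Nat → Int → List Int → List Int
  | 0, _, mid => mid
  | i+1, num, mid =>
      if num = 0 then mid.set i 0
      else getSvrAddrLoop n i (PySem.Int.floordiv num n) (mid.set i (PySem.Int.mod num n))

def getSvrAddr (x : Int) (n : Int) (k : Int) : List Int :=
  getSvrAddrLoop n (k+1).toNat x (List.replicate (k+1).toNat 0)

-- n**(k+1): exact for k ≥ -1 (Pre_ gives 0 ≤ k); a[0] and a[i] are in range at every call site
-- reached under Pre_, so pyGetD with default 0 is exact there.
def switchAddr2ID (addr : List Int) (n : Int) (k : Int) : Int :=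
  let a := addr ++ []
  let ID := n ^ (k+1).toNat + PySem.List.pyGetD a 0 0 * n ^ k.toNat
  (PySem.List.pyRange 1 (k+1) 1).foldl (fun ID i => ID + PySem.List.pyGetD a i 0 * n ^ (k - i).toNat) ID

def getCommonSwitch (x : Int) (y : Int) (n : Int) (k : Int) : Int :=
  let x_addr := getSvrAddr x n k
  let y_addr := getSvrAddr y n k
  let l? := (PySem.List.pyRange 0 (k+1) 1).foldl
      (fun l? i => if PySem.List.pyGetD x_addr i 0 ≠ PySem.List.pyGetD y_addr i 0 then some (k - i) else l?)
      none
  match l? with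
  | none => 0            -- Python: l unbound → NameError; excluded by Pre_
  | some l =>
      -- del temp[k-l]: 0 ≤ k-l < len(temp) whenever l was set by the loop, so eraseIdx is exact
      let temp := (x_addr ++ []).eraseIdx (k - l).toNat
      let commonsw_addr := [l] ++ temp
      switchAddr2ID commonsw_addr n k

-- ===== PORT B =====
-- state: (qx, qy, low, l, lowl, qhi); in Python lowl/qhi are unbound until l is set (reading
-- them unbound raises only when l stays -1, which Pre_ excludes), so 0 initialisers are exact.
def getCommonSwitch_alt (x : Int) (y : Int) (n : Int) (k : Int) : Int :=
  let s := (PySem.List.pyRange 0 (k+1) 1).foldl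
    (fun (s : Int × Int × Int × Int × Int × Int) t =>
      let (qx, qy, low, l, lowl, qhi) := s
      let (l, lowl, qhi) :=
        if l < 0 ∧ PySem.Int.mod qx n ≠ PySem.Int.mod qy n then (t, low, PySem.Int.floordiv qx n)
        else (l, lowl, qhi)
      (PySem.Int.floordiv qx n, PySem.Int.floordiv qy n,
       low + PySem.Int.mod qx n * n ^ t.toNat, l, lowl, qhi))
    (x, y, 0, -1, 0, 0)
  let (qx, _, _, l, lowl, qhi) := s
  let high := qhi - n ^ (k - l).toNat * qx
  n ^ (k+1).toNat + l * n ^ k.toNat + high * n ^ l.toNat + lowl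

-- ===== PRECONDITION & SPEC =====
-- Pre_ is exactly the set of inputs on which Python A returns: A raises for k < 0 or n = 0
-- (NameError / ZeroDivisionError), and raises NameError when x ≡ y (mod n^(k+1)) — then the
-- k+1 base-n address digits of x and y coincide, l is never bound. No returning input is excluded.
-- The mathematical condition is n^(k+1) ∤ (x - y); since Dom bounds |x - y| < 2^64, a power
-- beyond n^64 divides x - y iff x = y, so the exponent is capped at 64 to keep the condition
-- cheaply decidable for huge k (the set of admitted inputs inside Dom is unchanged).
def Pre_getCommonSwitch (x : Int) (y : Int) (n : Int) (k : Int) : Prop :=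
  0 ≤ k ∧ n ≠ 0 ∧ x ≠ y ∧ ¬ ((n ^ (min (k+1).toNat 64)) ∣ (x - y))
instance (x : Int) (y : Int) (n : Int) (k : Int) : Decidable (Pre_getCommonSwitch x y n k) := by
  unfold Pre_getCommonSwitch; infer_instance

def pvWitness_getCommonSwitch : Int × Int × Int × Int := (0, 1, 2, 1)

def Spec_getCommonSwitch (x : Int) (y : Int) (n : Int) (k : Int) (out : Int) : Prop := out = getCommonSwitch_alt x y n k
instance (x : Int) (y : Int) (n : Int) (k : Int) (out : Int) : Decidable (Spec_getCommonSwitch x y n k out) := by unfold Spec_getCommonSwitch; infer_instance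

-- ===== CLAIM (what is proved, stated in full; the proofs are below) =====
def Claim_equal_getCommonSwitch : Prop := ∀ (x : Int) (y : Int) (n : Int) (k : Int), Dom_getCommonSwitch x y n k → Pre_getCommonSwitch x y n k → Spec_getCommonSwitch x y n k (getCommonSwitch x y n k)

-- ===== LEMMAS AND PROOFS =====

-- iterated Python floor quotient: itq n t x = x //n //n … //n (t times)
def itq (n : Int) : Nat → Int → Int
  | 0, x => x
  | t+1, x => PySem.Int.floordiv (itq n t x) n

-- t-th base-n digit of x (Python divmod digits)
def dig (n : Int) (t : Nat) (x : Int) : Int := PySem.Int.mod (itq n t x) n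

-- value of the t lowest digits of x
def lowv (n : Int) (t : Nat) (x : Int) : Int := x - n ^ t * itq n t x

-- most-significant-first base-n value of a digit list
def valMSB (n : Int) (L : List Int) : Int := L.foldl (fun a d => a * n + d) 0

-- digit list of x, m digits, most significant first (what getSvrAddr builds)
def digList (n : Int) (m : Nat) (x : Int) : List Int :=
  (List.range m).map (fun j => dig n (m-1-j) x)

theorem itq_succ_comm (n : Int) (t : Nat) (x : Int) :
    itq n (t+1) x = itq n t (PySem.Int.floordiv x n) := by
  induction t generalizing x with
  | zero => rfl
  | succ t ih => show PySem.Int.floordiv (itq n (t+1) x) n = _; rw [ih]; rfl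

theorem itq_add (n : Int) (s t : Nat) (x : Int) : itq n (s+t) x = itq n t (itq n s x) := by
  induction t with
  | zero => rfl
  | succ t ih => show PySem.Int.floordiv (itq n (s+t) x) n = _; rw [ih]; rfl

theorem itq_zero_val (n : Int) (t : Nat) : itq n t 0 = 0 := by
  induction t with
  | zero => rfl
  | succ t ih => show PySem.Int.floordiv (itq n t 0) n = 0; rw [ih]; simp [PySem.Int.floordiv]

theorem dig_zero_val (n : Int) (t : Nat) : dig n t 0 = 0 := by
  simp [dig, itq_zero_val, PySem.Int.mod]

theorem dig_succ (n : Int) (t : Nat) (x : Int) :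
    dig n (t+1) x = dig n t (PySem.Int.floordiv x n) := by
  simp [dig, itq_succ_comm]

theorem lowv_succ (n : Int) (t : Nat) (x : Int) :
    lowv n (t+1) x = lowv n t x + n ^ t * dig n t x := by
  have h := PySem.Int.floordiv_mul_add_mod (itq n t x) n
  show x - n ^ (t+1) * PySem.Int.floordiv (itq n t x) n = _
  simp only [lowv, dig]
  linear_combination (-(n ^ t)) * h

theorem digList_cons (n : Int) (m : Nat) (x : Int) :
    digList n (m+1) x = dig n m x :: digList n m x := by
  simp only [digList, List.range_succ_eq_map, List.map_cons, List.map_map]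
  refine congrArg₂ _ (by norm_num) (List.map_congr_left ?_)
  intro j hj
  simp only [Function.comp_apply]
  congr 1
  omega

-- placeholder sorries below; filled incrementally
theorem valMSB_init (n : Int) (L : List Int) (acc : Int) :
    L.foldl (fun a d => a * n + d) acc = acc * n ^ L.length + valMSB n L := by
  induction L generalizing acc with
  | nil => simp [valMSB]
  | cons d t ih =>
      simp only [List.foldl_cons, List.length_cons, valMSB]
      rw [ih (acc * n + d), ih (0 * n + d)]
      ring

theorem valMSB_append (n : Int) (A B : List Int) :
    valMSB n (A ++ B) = valMSB n A * n ^ B.length + valMSB n B := by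
  simp only [valMSB, List.foldl_append]
  rw [valMSB_init n B (A.foldl (fun a d => a * n + d) 0)]
  rfl

theorem digList_shift (n : Int) (m : Nat) (x : Int) :
    digList n (m+1) x = digList n m (PySem.Int.floordiv x n) ++ [dig n 0 x] := by
  simp only [digList, List.range_succ, List.map_append, List.map_cons, List.map_nil]
  refine congrArg₂ _ (List.map_congr_left ?_) (by norm_num)
  intro j hj
  have hj' : j < m := List.mem_range.mp hj
  have : m + 1 - 1 - j = (m - 1 - j) + 1 := by omega
  rw [this, dig_succ]

theorem valMSB_digList (n : Int) (m : Nat) (x : Int) :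
    valMSB n (digList n m x) = lowv n m x := by
  induction m generalizing x with
  | zero => simp [digList, valMSB, lowv, itq]
  | succ m ih =>
      rw [digList_shift, valMSB_append, ih]
      have h := PySem.Int.floordiv_mul_add_mod x n
      have h1 : PySem.Int.floordiv (itq n m x) n = itq n m (PySem.Int.floordiv x n) :=
        itq_succ_comm n m x
      simp only [lowv, valMSB, List.length_cons, List.length_nil, List.foldl_cons,
        List.foldl_nil, dig, itq]
      linear_combination h + n ^ (m+1) * h1


theorem lowv_zero (n x : Int) : lowv n 0 x = 0 := by simp [lowv, itq]

theorem digList_length (n : Int) (m : Nat) (x : Int) : (digList n m x).length = m := by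
  simp [digList]

theorem digList_zero_val (n : Int) (m : Nat) : digList n m 0 = List.replicate m 0 := by
  simp only [digList]
  rw [List.map_congr_left (fun j _ => dig_zero_val n (m-1-j))]
  simp [List.map_const']

theorem svrLoop (n : Int) : ∀ (m : Nat) (num : Int) (suf : List Int),
    getSvrAddrLoop n m num (List.replicate m 0 ++ suf) = digList n m num ++ suf := by
  intro m
  induction m with
  | zero => intro num suf; simp [getSvrAddrLoop, digList]
  | succ m ih =>
      intro num suf
      have hset : ∀ v : Int, (List.replicate (m+1) (0:Int) ++ suf).set m v
          = List.replicate m 0 ++ (v :: suf) := by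
        intro v; rw [List.replicate_succ', List.append_assoc, List.set_append]; simp
      by_cases h0 : num = 0
      · subst h0
        simp only [getSvrAddrLoop]
        rw [hset, digList_zero_val, List.replicate_succ']
        simp
      · simp only [getSvrAddrLoop, if_neg h0, hset]
        rw [ih, digList_shift]
        simp [dig, itq]

theorem getSvrAddr_eq (x n k : Int) : getSvrAddr x n k = digList n (k+1).toNat x := by
  have h := svrLoop n (k+1).toNat x []
  simpa [getSvrAddr] using h

theorem digList_split (n : Int) (s m : Nat) (x : Int) :
    digList n (s+m) x = digList n s (itq n m x) ++ digList n m x := by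
  induction s with
  | zero => simp [digList]
  | succ s ih =>
      have h1 : s+1+m = (s+m)+1 := by omega
      rw [h1, digList_cons, ih, digList_cons]
      have hd : dig n (s+m) x = dig n s (itq n m x) := by
        rw [show s+m = m+s by omega, dig, itq_add]; rfl
      rw [hd, List.cons_append]

theorem idxfold (n : Int) : ∀ (temp : List Int) (acc : Int),
    (List.range temp.length).foldl (fun ID j => ID + temp.getD j 0 * n ^ (temp.length - 1 - j)) acc
      = acc + valMSB n temp := by
  intro temp
  induction temp with
  | nil => intro acc; simp [valMSB]
  | cons d t ih =>
      intro acc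
      simp only [List.length_cons, List.range_succ_eq_map, List.foldl_cons, List.foldl_map]
      have hfun : (fun (ID:Int) (j:Nat) => ID + (d::t).getD (Nat.succ j) 0 * n ^ (t.length + 1 - 1 - Nat.succ j))
          = (fun (ID:Int) (j:Nat) => ID + t.getD j 0 * n ^ (t.length - 1 - j)) := by
        funext ID j
        show ID + (d::t).getD (j+1) 0 * n ^ (t.length + 1 - 1 - (j+1)) = _
        rw [List.getD_cons_succ, show t.length + 1 - 1 - (j+1) = t.length - 1 - j from by omega]
      have h0 : (d::t).getD 0 0 = d := rfl
      have h3 : t.length + 1 - 1 - 0 = t.length := by omega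
      rw [h0, h3, hfun, ih]
      have hv : valMSB n (d::t) = d * n ^ t.length + valMSB n t := by
        show t.foldl (fun a d => a * n + d) ((0:Int)*n+d) = _
        simpa using valMSB_init n t (0*n+d)
      rw [hv]; ring

theorem switchA (n : Int) (κ : Nat) (l : Int) (temp : List Int) (hlen : temp.length = κ) :
    switchAddr2ID (l :: temp) n (κ : Int) = n ^ (κ+1) + l * n ^ κ + valMSB n temp := by
  subst hlen
  unfold switchAddr2ID
  simp only [List.append_nil]
  have ht : (((temp.length : Int))+1).toNat = temp.length + 1 := by omega
  have ht2 : ((temp.length : Int)).toNat = temp.length := by omega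
  rw [ht, ht2, PySem.List.pyGetD_zero_cons]
  have hr : PySem.List.pyRange 1 ((temp.length:Int)+1)
      = List.map (fun k : Nat => 1 + (k:Int)) (List.range temp.length) := by
    rw [PySem.List.pyRange_one, show ((temp.length:Int)+1-1).toNat = temp.length from by omega]
  rw [hr, List.foldl_map]
  have hcongr := PySem.List.foldl_congr_mem (List.range temp.length)
    (fun (ID : Int) (j : Nat) => ID + PySem.List.pyGetD (l :: temp) (1 + (j:Int)) 0 * n ^ (((temp.length:Int)) - (1 + (j:Int))).toNat)
    (fun (ID : Int) (j : Nat) => ID + temp.getD j 0 * n ^ (temp.length - 1 - j))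
    (n ^ (temp.length + 1) + l * n ^ temp.length)
    (by
      intro acc j hj
      dsimp only
      have hj' : j < temp.length := List.mem_range.mp hj
      have e1 : (1 : Int) + (j:Int) = ((j+1 : Nat) : Int) := by push_cast; ring
      rw [e1, PySem.List.pyGetD_natCast, List.getD_cons_succ]
      have e2 : ((temp.length:Int) - ((j+1 : Nat):Int)).toNat = temp.length - 1 - j := by omega
      rw [e2])
  rw [hcongr, idxfold]

-- A's search loop, as a recursive function: scans exponents κ, κ-1, …, κ-m+1 (last writer wins)
def tmA (n x y : Int) (κ : Nat) : Nat → Option Int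
  | 0 => none
  | m+1 => if dig n (κ-m) x ≠ dig n (κ-m) y then some ((κ:Int) - (m:Int)) else tmA n x y κ m

theorem foldA (n x y : Int) (κ : Nat) (m : Nat) :
    (List.range m).foldl
      (fun l? (j:Nat) => if dig n (κ-j) x ≠ dig n (κ-j) y then some ((κ:Int)-(j:Int)) else l?) none
      = tmA n x y κ m := by
  induction m with
  | zero => rfl
  | succ m ih => rw [List.range_succ, List.foldl_append, ih]; rfl

theorem tmA_find (n x y : Int) (κ : Nat)
    (hex : ∃ t, t < κ+1 ∧ dig n t x ≠ dig n t y) :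
    ∀ (m : Nat), m ≤ κ+1 → κ+1-m ≤ Nat.find hex → tmA n x y κ m = some (Nat.find hex : Int) := by
  intro m
  induction m with
  | zero =>
      intro _ h
      have hs := Nat.find_spec hex
      have := hs.1
      omega
  | succ m ih =>
      intro hm hwin
      have hs := Nat.find_spec hex
      by_cases hq : dig n (κ-m) x ≠ dig n (κ-m) y
      · have hle : Nat.find hex ≤ κ-m := Nat.find_min' hex ⟨by omega, hq⟩
        simp only [tmA, if_pos hq]
        congr 1
        omega
      · simp only [tmA, if_neg hq]
        have hne : Nat.find hex ≠ κ-m := by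
          intro h; exact hq (h ▸ hs.2)
        exact ih (by omega) (by omega)

-- B's search state: (l, lowl, qhi) after the first m iterations
def fmB (n x y : Int) : Nat → Int × Int × Int
  | 0 => (-1, 0, 0)
  | m+1 => if (fmB n x y m).1 < 0 ∧ dig n m x ≠ dig n m y
           then ((m:Int), lowv n m x, itq n (m+1) x) else fmB n x y m

theorem altLoop (n x y : Int) (m : Nat) :
    (PySem.List.pyRange 0 (m : Int) 1).foldl
      (fun (s : Int × Int × Int × Int × Int × Int) t =>
        let (qx, qy, low, l, lowl, qhi) := s
        let (l, lowl, qhi) :=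
          if l < 0 ∧ PySem.Int.mod qx n ≠ PySem.Int.mod qy n then (t, low, PySem.Int.floordiv qx n)
          else (l, lowl, qhi)
        (PySem.Int.floordiv qx n, PySem.Int.floordiv qy n,
         low + PySem.Int.mod qx n * n ^ t.toNat, l, lowl, qhi))
      (x, y, 0, -1, 0, 0)
      = (itq n m x, itq n m y, lowv n m x, fmB n x y m) := by
  induction m with
  | zero =>
      rw [Nat.cast_zero, PySem.List.pyRange_one_eq_nil le_rfl]
      simp only [List.foldl_nil, fmB, itq, lowv_zero]
  | succ m ih =>
      rw [show ((m+1 : Nat) : Int) = (m:Int)+1 from by push_cast; ring,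
          PySem.List.pyRange_one_succ_right (by omega : (0:Int) ≤ (m:Int)),
          List.foldl_append, ih, List.foldl_cons, List.foldl_nil]
      rcases hfm : fmB n x y m with ⟨l0, lw0, qh0⟩
      simp only [fmB, hfm, dig]
      rw [Int.toNat_natCast]
      split_ifs with hcond
      all_goals
        rw [lowv_succ]
        simp only [Prod.mk.injEq, itq, dig, true_and, and_true]
        ring

theorem fmB_neg (n x y : Int) : ∀ (m : Nat), (∀ t, t < m → dig n t x = dig n t y) →
    fmB n x y m = (-1, 0, 0) := by
  intro m
  induction m with
  | zero => intro _; rfl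
  | succ m ih =>
      intro h
      have h1 : fmB n x y m = (-1,0,0) := ih (fun t ht => h t (by omega))
      simp [fmB, h1, h m (by omega)]

theorem fmB_found (n x y : Int) (hex : ∃ t, t < κ+1 ∧ dig n t x ≠ dig n t y) :
    ∀ (j : Nat), fmB n x y (Nat.find hex + 1 + j)
      = ((Nat.find hex : Int), lowv n (Nat.find hex) x, itq n (Nat.find hex + 1) x) := by
  intro j
  induction j with
  | zero =>
      have hs := Nat.find_spec hex
      have h0 : fmB n x y (Nat.find hex) = (-1,0,0) :=
        fmB_neg n x y _ (fun t ht => by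
          have hmin := Nat.find_min hex ht
          by_contra hne
          exact hmin ⟨by omega, hne⟩)
      show fmB n x y (Nat.find hex + 1) = _
      simp only [fmB]
      rw [h0, if_pos ⟨by norm_num, hs.2⟩]
  | succ j ih =>
      show fmB n x y ((Nat.find hex + 1 + j) + 1) = _
      have hnneg : ¬((Nat.find hex : Int) < 0) := by omega
      simp only [fmB]
      rw [ih, if_neg (fun hcon => hnneg hcon.1)]

theorem exists_diff (n x y : Int) (K : Nat) (hd : ¬ (n ^ K ∣ (x - y))) :
    ∃ t, t < K ∧ dig n t x ≠ dig n t y := by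
  by_contra hc
  push Not at hc
  apply hd
  have hl : ∀ m, m ≤ K → lowv n m x = lowv n m y := by
    intro m
    induction m with
    | zero => intro _; simp [lowv_zero]
    | succ m ih => intro hm; rw [lowv_succ, lowv_succ, ih (by omega), hc m (by omega)]
  have h1 := hl K le_rfl
  simp only [lowv] at h1
  exact ⟨itq n K x - itq n K y, by linear_combination h1⟩

-- ===== VERDICT (by name: the statement is the Claim_ definition above) =====
theorem main_eq (x y n : Int) (κ : Nat) (hd : ¬ (n ^ (κ+1) ∣ (x - y))) :
    getCommonSwitch x y n (κ : Int) = getCommonSwitch_alt x y n (κ : Int) := by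
  have hex : ∃ t, t < κ+1 ∧ dig n t x ≠ dig n t y := exists_diff n x y (κ+1) hd
  have hs := Nat.find_spec hex
  set t0 := Nat.find hex with ht0def
  have ht0 : t0 < κ+1 := hs.1
  set p := κ - t0 with hpdef
  have hK : ((κ:Int)+1).toNat = κ+1 := by omega
  have hKc : ((κ:Int)+1) = ((κ+1 : Nat) : Int) := by push_cast; ring
  have hAddrx : getSvrAddr x n (κ:Int) = digList n (κ+1) x := by rw [getSvrAddr_eq, hK]
  have hAddry : getSvrAddr y n (κ:Int) = digList n (κ+1) y := by rw [getSvrAddr_eq, hK]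
  have hr0 : PySem.List.pyRange 0 ((κ:Int)+1) 1
      = (List.range (κ+1)).map (fun j : Nat => (j:Int)) := by
    rw [hKc, PySem.List.pyRange_zero_natCast]
  -- A's search loop returns some t0
  have hfoldA : (PySem.List.pyRange 0 ((κ:Int)+1) 1).foldl
      (fun l? i => if PySem.List.pyGetD (getSvrAddr x n (κ:Int)) i 0
          ≠ PySem.List.pyGetD (getSvrAddr y n (κ:Int)) i 0 then some ((κ:Int) - i) else l?)
      none = some (t0 : Int) := by
    rw [hAddrx, hAddry, hr0, List.foldl_map]
    have hcongr := PySem.List.foldl_congr_mem (List.range (κ+1))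
      (fun (l? : Option Int) (j : Nat) => if PySem.List.pyGetD (digList n (κ+1) x) (j:Int) 0
          ≠ PySem.List.pyGetD (digList n (κ+1) y) (j:Int) 0 then some ((κ:Int) - (j:Int)) else l?)
      (fun (l? : Option Int) (j : Nat) =>
        if dig n (κ-j) x ≠ dig n (κ-j) y then some ((κ:Int)-(j:Int)) else l?)
      none
      (by
        intro acc j hj
        have hj' : j < κ+1 := List.mem_range.mp hj
        dsimp only
        rw [PySem.List.pyGetD_natCast, PySem.List.pyGetD_natCast]
        unfold digList
        rw [PySem.List.getD_map_range _ _ _ _ hj', PySem.List.getD_map_range _ _ _ _ hj',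
            show κ+1-1-j = κ-j from by omega])
    rw [hcongr, foldA n x y κ (κ+1)]
    exact tmA_find n x y κ hex (κ+1) le_rfl (by omega)
  -- the deleted-digit address list
  have hHiLen : (digList n p (itq n (t0+1) x)).length = p := digList_length n p _
  have htemp : (digList n (κ+1) x ++ []).eraseIdx ((κ:Int) - (t0:Int)).toNat
      = digList n p (itq n (t0+1) x) ++ digList n t0 x := by
    rw [List.append_nil, show ((κ:Int) - (t0:Int)).toNat = p from by omega,
        show κ+1 = p + (t0+1) from by omega, digList_split, digList_cons,
        List.eraseIdx_append_of_length_le (le_of_eq hHiLen)]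
    simp [hHiLen]
  -- A's value
  have hA : getCommonSwitch x y n (κ:Int)
      = n^(κ+1) + (t0:Int) * n^κ + (lowv n p (itq n (t0+1) x) * n^t0 + lowv n t0 x) := by
    simp only [getCommonSwitch, hfoldA]
    rw [hAddrx, htemp]
    rw [show ([(t0:Int)] ++ (digList n p (itq n (t0+1) x) ++ digList n t0 x))
        = ((t0:Int) :: (digList n p (itq n (t0+1) x) ++ digList n t0 x)) from rfl]
    rw [switchA n κ _ _ (by simp [digList_length]; omega)]
    rw [valMSB_append, valMSB_digList, valMSB_digList, digList_length]
  -- B's loop state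
  have hfm : fmB n x y (κ+1) = ((t0:Int), lowv n t0 x, itq n (t0+1) x) := by
    rw [show κ+1 = t0+1+p from by omega]
    exact fmB_found n x y hex p
  have hB : getCommonSwitch_alt x y n (κ:Int)
      = n^(κ+1) + (t0:Int) * n^κ
        + (itq n (t0+1) x - n^p * itq n (κ+1) x) * n^t0 + lowv n t0 x := by
    simp only [getCommonSwitch_alt]
    rw [hKc, altLoop n x y (κ+1), hfm]
    dsimp only
    rw [Int.toNat_natCast, Int.toNat_natCast, Int.toNat_natCast,
        show ((κ:Int) - (t0:Int)).toNat = p from by omega]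
  rw [hA, hB]
  have hlow : lowv n p (itq n (t0+1) x)
      = itq n (t0+1) x - n^p * itq n (κ+1) x := by
    simp only [lowv]
    rw [show κ+1 = (t0+1)+p from by omega, itq_add n (t0+1) p x]
  rw [hlow]; ring

theorem getCommonSwitch_spec : Claim_equal_getCommonSwitch := by
  unfold Claim_equal_getCommonSwitch
  intro x y n k hdom hpre
  obtain ⟨hk, hn0, hxy, hdm⟩ := hpre
  unfold Spec_getCommonSwitch
  lift k to ℕ using hk with κ
  rw [show ((κ:Int)+1).toNat = κ+1 from by omega] at hdm
  have hd : ¬ (n ^ (κ+1) ∣ (x - y)) := by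
    by_cases hsmall : κ+1 ≤ 64
    · rwa [Nat.min_eq_left hsmall] at hdm
    · intro hdvd
      have hn1 : 2 ≤ n.natAbs := by
        by_contra hlt
        have hu : IsUnit n := Int.isUnit_iff.mpr (by omega)
        exact hdm ((hu.pow _).dvd)
      unfold Dom_getCommonSwitch at hdom
      simp only [pvDomInt, Bool.and_eq_true, decide_eq_true_eq] at hdom
      have hxyabs : (x - y).natAbs < 2^64 := by
        obtain ⟨⟨⟨hx, hy⟩, _⟩, _⟩ := hdom
        have : (2:Nat)^64 = 18446744073709551616 := by norm_num
        omega
      have hle : (n ^ (κ+1)).natAbs ≤ (x - y).natAbs :=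
        Nat.le_of_dvd (by omega) (Int.natAbs_dvd_natAbs.mpr hdvd)
      have h2 : 2^(κ+1) ≤ (n ^ (κ+1)).natAbs := by
        rw [Int.natAbs_pow]; exact Nat.pow_le_pow_left hn1 _
      have h3 : 2^64 < 2^(κ+1) := Nat.pow_lt_pow_right (by norm_num) (by omega)
      omega
  exact main_eq x y n κ hd
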